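-- pv_equiv track=rewrite | github.com/lcrf1975/zis_studio | app.py | find_best_match_index
-- ===== SOURCE A (Python) =====
-- def find_best_match_index(options, target_value):
--     if not target_value: return -1
--     if target_value in options: return options.index(target_value)
--     lower_target = str(target_value).lower().strip()
--     for i, opt in enumerate(options):
--         if str(opt).lower().strip() == lower_target:
--             return i
--     return -1
-- ===== SOURCE B (Python) =====
-- def find_best_match_index(options, target_value):
--     if not target_value:
--         return -1
--     fallback = -1
--     lower_target = target_value.lower().strip()
--     for i, opt in enumerate(options):
--         if opt == target_value:
--             return i
--         if fallback == -1 and opt.lower().strip() == lower_target: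
--             fallback = i
--     return fallback
-- ===== Notes on version B (the rewrite author's own statement) =====
-- stated objective: simpler
-- what changed: Collapses A's two scans (membership+index, then a normalized-comparison loop) into one enumerate pass that returns on an exact match and remembers the first normalized match as a fallback.
import Mathlib
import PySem

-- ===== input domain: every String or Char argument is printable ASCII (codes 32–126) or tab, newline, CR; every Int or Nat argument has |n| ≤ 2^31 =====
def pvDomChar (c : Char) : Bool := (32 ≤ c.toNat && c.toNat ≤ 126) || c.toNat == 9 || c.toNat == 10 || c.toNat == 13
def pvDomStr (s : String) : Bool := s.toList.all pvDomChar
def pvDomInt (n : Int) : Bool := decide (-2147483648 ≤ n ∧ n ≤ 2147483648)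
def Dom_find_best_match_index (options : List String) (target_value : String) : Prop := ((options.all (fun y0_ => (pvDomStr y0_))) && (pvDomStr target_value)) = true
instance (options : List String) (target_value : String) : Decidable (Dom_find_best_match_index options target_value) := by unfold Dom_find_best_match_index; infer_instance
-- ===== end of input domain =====

-- ===== PORT A =====
-- One honest line: B collapses A's membership+index pass and normalized-scan pass into a single
-- enumerate loop with an exact-match early return and a first-normalized-match fallback (objective: simpler).

-- loop 'for i, opt in enumerate(options): if str(opt).lower().strip() == lower_target: return i' / 'return -1'
def pvNormLoopA (options : List String) (lower_target : String) (i : Nat) : Int :=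
  match options with
  | [] => -1
  | opt :: rest =>
    if PySem.Str.strip (PySem.Str.lower opt) = lower_target then (i : Int)
    else pvNormLoopA rest lower_target (i + 1)

def find_best_match_index (options : List String) (target_value : String) : Int :=
  if target_value = "" then -1
  else if target_value ∈ options then
    match PySem.List.index? options target_value with
    | some i => (i : Int)
    | none => -1  -- unreachable: membership was just checked
  else
    let lower_target := PySem.Str.strip (PySem.Str.lower target_value)
    pvNormLoopA options lower_target 0

-- ===== PORT B =====
-- single pass: return i on exact match, remember first normalized match in fallback
def pvLoopB (options : List String) (target_value lower_target : String) (i : Nat) (fallback : Int) : Int :=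
  match options with
  | [] => fallback
  | opt :: rest =>
    if opt = target_value then (i : Int)
    else pvLoopB rest target_value lower_target (i + 1)
      (if fallback = -1 ∧ PySem.Str.strip (PySem.Str.lower opt) = lower_target then (i : Int) else fallback)

def find_best_match_index_alt (options : List String) (target_value : String) : Int :=
  if target_value = "" then -1
  else pvLoopB options target_value (PySem.Str.strip (PySem.Str.lower target_value)) 0 (-1)

-- ===== PRECONDITION & SPEC =====
def Spec_find_best_match_index (options : List String) (target_value : String) (out : Int) : Prop := out = find_best_match_index_alt options target_value
instance (options : List String) (target_value : String) (out : Int) : Decidable (Spec_find_best_match_index options target_value out) := by unfold Spec_find_best_match_index; infer_instance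

-- ===== CLAIM (what is proved, stated in full; the proofs are below) =====
def Claim_equal_find_best_match_index : Prop := ∀ (options : List String) (target_value : String), Dom_find_best_match_index options target_value → Spec_find_best_match_index options target_value (find_best_match_index options target_value)

-- ===== LEMMAS AND PROOFS =====

-- ===== VERDICT (by name: the statement is the Claim_ definition above) =====
-- no exact match in opts: B's loop returns the fallback if set, else the first normalized match (A's loop)
theorem pvLoopB_no_exact (opts : List String) (t lt : String) (i : Nat) (f : Int)
    (h : t ∉ opts) :
    pvLoopB opts t lt i f = if f = -1 then pvNormLoopA opts lt i else f := by
  induction opts generalizing i f with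
  | nil => simp [pvLoopB, pvNormLoopA]
  | cons o rest ih =>
    simp only [List.mem_cons, not_or] at h
    rw [pvLoopB, pvNormLoopA]
    rw [if_neg (fun e => h.1 e.symm)]
    rw [ih _ _ h.2]
    by_cases hf : f = -1
    · subst hf
      by_cases hn : PySem.Str.strip (PySem.Str.lower o) = lt
      · simp [hn]
      · simp [hn]
    · simp [hf]

-- exact match present: B's loop returns i + (first index of t), whatever the fallback
theorem pvLoopB_exact (opts : List String) (t lt : String) (i : Nat) (f : Int) (j : Nat)
    (h : PySem.List.index? opts t = some j) :
    pvLoopB opts t lt i f = ((i + j : Nat) : Int) := by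
  induction opts generalizing i f j with
  | nil => simp [PySem.List.index?] at h
  | cons o rest ih =>
    by_cases ho : o = t
    · subst ho
      rw [PySem.List.index?_cons_self] at h
      injection h with h; subst h
      simp [pvLoopB]
    · rw [PySem.List.index?_cons_of_ne rest ho] at h
      rw [pvLoopB, if_neg ho]
      match hj : PySem.List.index? rest t with
      | some j' =>
        rw [hj] at h; simp at h; subst h
        rw [ih _ _ _ hj]
        congr 1; omega
      | none => rw [hj] at h; simp at h

-- ===== VERDICT (by name: the statement is the Claim_ definition above) =====
theorem find_best_match_index_spec : Claim_equal_find_best_match_index := by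
  intro options target_value _
  unfold Spec_find_best_match_index find_best_match_index find_best_match_index_alt
  by_cases ht : target_value = ""
  · simp [ht]
  · rw [if_neg ht, if_neg ht]
    by_cases hm : target_value ∈ options
    · rw [if_pos hm]
      have := (PySem.List.index?_isSome_iff (xs := options) (v := target_value)).mpr hm
      match hj : PySem.List.index? options target_value with
      | some j =>
        rw [pvLoopB_exact options target_value _ 0 (-1) j hj]
        simp
      | none => rw [hj] at this; simp at this
    · rw [if_neg hm, pvLoopB_no_exact options target_value _ 0 (-1) hm]
      simp
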